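-- pv_equiv track=rewrite | github.com/hi-imAndy/knowledge-space-theory-with-dnn | dnn/predict.py | convert_to_kst_dict
-- ===== SOURCE A (Python) =====
-- def convert_to_kst_dict(results: dict):
--     kst_results = {
--         'ellipse': [],
--         'square': [],
--         'triangle': []
--     }
--     for res in results.values():
--         kst_results['ellipse'].append(res[0])
--         kst_results['square'].append(res[1])
--         kst_results['triangle'].append(res[2])
--     return kst_results
-- ===== SOURCE B (Python) =====
-- def convert_to_kst_dict(results: dict):
--     rows = list(results.values())
--     return {key: [row[i] for row in rows]
--             for i, key in enumerate(('ellipse', 'square', 'triangle'))}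
-- ===== Notes on version B (the rewrite author's own statement) =====
-- stated objective: simpler
-- what changed: B builds each keyed list in its own column pass (a dict comprehension with one per-key list comprehension over the rows), replacing A's single row loop that mutates three pre-created accumulator lists via index-and-append.
import Mathlib
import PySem

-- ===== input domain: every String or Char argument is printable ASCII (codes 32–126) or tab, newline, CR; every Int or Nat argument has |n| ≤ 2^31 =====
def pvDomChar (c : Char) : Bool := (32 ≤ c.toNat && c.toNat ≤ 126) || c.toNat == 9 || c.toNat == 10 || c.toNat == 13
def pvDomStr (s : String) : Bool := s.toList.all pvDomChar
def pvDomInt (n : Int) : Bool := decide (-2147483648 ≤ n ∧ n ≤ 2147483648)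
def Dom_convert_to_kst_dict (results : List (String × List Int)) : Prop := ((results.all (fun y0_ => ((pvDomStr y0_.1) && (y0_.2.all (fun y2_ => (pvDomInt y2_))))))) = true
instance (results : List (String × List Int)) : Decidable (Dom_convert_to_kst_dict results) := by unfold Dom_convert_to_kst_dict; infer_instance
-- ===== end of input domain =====

-- B builds each keyed list in its own column pass (a per-key list comprehension over the rows),
-- replacing A's single row loop that mutates three accumulator lists; same cost, simpler.
-- Equivalence is about the return value; neither mutates its argument.

-- ===== PORT A =====
-- res[0]/res[1]/res[2] are ported via PySem.List.pyGet?; the '.getD 0' only fills the slot where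
-- Python raises IndexError — exactly the inputs Pre_convert_to_kst_dict excludes.
def convert_to_kst_dict (results : List (String × List Int)) : List (String × List Int) :=
  let st := ((PySem.Dict.ofList results).values).foldl
    (fun (st : List Int × List Int × List Int) res =>
      (st.1 ++ [(PySem.List.pyGet? res 0).getD 0],
       st.2.1 ++ [(PySem.List.pyGet? res 1).getD 0],
       st.2.2 ++ [(PySem.List.pyGet? res 2).getD 0])) ([], [], [])
  [("ellipse", st.1), ("square", st.2.1), ("triangle", st.2.2)]

-- ===== PORT B =====
-- The dict comprehension over enumerate(('ellipse','square','triangle')) becomes a map over the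
-- enumerated key list; each inner comprehension '[row[i] for row in rows]' a map with pyGet?
-- ('.getD 0' again only fills the IndexError slot excluded by Pre_).
def convert_to_kst_dict_alt (results : List (String × List Int)) : List (String × List Int) :=
  let rows := (PySem.Dict.ofList results).values
  (PySem.List.enumerate ["ellipse", "square", "triangle"]).map
    (fun p => (p.2, rows.map (fun row => (PySem.List.pyGet? row p.1).getD 0)))

-- ===== PRECONDITION & SPEC =====
-- Pre_ excludes exactly the inputs on which both Pythons raise IndexError: a dict value with fewer than 3 entries.
def Pre_convert_to_kst_dict (results : List (String × List Int)) : Prop :=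
  ∀ v ∈ (PySem.Dict.ofList results).values, 3 ≤ v.length
instance (results : List (String × List Int)) : Decidable (Pre_convert_to_kst_dict results) := by unfold Pre_convert_to_kst_dict; infer_instance
def pvWitness_convert_to_kst_dict : (List (String × List Int)) := [("a", [1, 2, 3]), ("b", [4, 5, 6, 7])]

def Spec_convert_to_kst_dict (results : List (String × List Int)) (out : List (String × List Int)) : Prop := out = convert_to_kst_dict_alt results
instance (results : List (String × List Int)) (out : List (String × List Int)) : Decidable (Spec_convert_to_kst_dict results out) := by unfold Spec_convert_to_kst_dict; infer_instance

-- ===== CLAIM (what is proved, stated in full; the proofs are below) =====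
def Claim_equal_convert_to_kst_dict : Prop := ∀ (results : List (String × List Int)), Dom_convert_to_kst_dict results → Pre_convert_to_kst_dict results → Spec_convert_to_kst_dict results (convert_to_kst_dict results)

-- ===== LEMMAS AND PROOFS =====

-- A's loop builds the three accumulators as maps over the value list.
theorem foldA_eq (vals : List (List Int)) (a b c : List Int) :
    vals.foldl
      (fun (st : List Int × List Int × List Int) res =>
        (st.1 ++ [(PySem.List.pyGet? res 0).getD 0],
         st.2.1 ++ [(PySem.List.pyGet? res 1).getD 0],
         st.2.2 ++ [(PySem.List.pyGet? res 2).getD 0])) (a, b, c)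
    = (a ++ vals.map (fun v => (PySem.List.pyGet? v 0).getD 0),
       b ++ vals.map (fun v => (PySem.List.pyGet? v 1).getD 0),
       c ++ vals.map (fun v => (PySem.List.pyGet? v 2).getD 0)) := by
  induction vals generalizing a b c with
  | nil => simp
  | cons v vs ih => simp [List.foldl_cons, ih, List.append_assoc]

-- ===== VERDICT (by name: the statement is the Claim_ definition above) =====
theorem convert_to_kst_dict_spec : Claim_equal_convert_to_kst_dict := by
  intro results _ _
  unfold Spec_convert_to_kst_dict convert_to_kst_dict convert_to_kst_dict_alt
  simp [foldA_eq, PySem.List.enumerate]
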